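-- pv_equiv track=rewrite | github.com/alexbouayad/google-kickstart | 2022/round-g/subarrays/solution.py | subarrays
-- ===== SOURCE A (Python) =====
-- def subarrays(array, n):
--     prefix = [0]
--     prefix.extend(prefix[-1] + array[i] for i in range(n))
--
--     second_prefix = [0]
--     second_prefix.extend(second_prefix[-1] + prefix[i] for i in range(n + 1))
--
--     nearest_smaller = [n + 1] * (n + 1)
--
--     for i in reversed(range(n)):
--         j = i + 1
--
--         while j <= n and prefix[i] <= prefix[j]:
--             j = nearest_smaller[j]
--
--         nearest_smaller[i] = j
--
--     return sum(
--         second_prefix[nearest_smaller[i]]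
--         - second_prefix[i + 1]
--         - prefix[i] * (nearest_smaller[i] - i - 1)
--         for i in range(n)
--     )
-- ===== SOURCE B (Python) =====
-- def subarrays(array, n):
--     prefix = [0]
--     s = 0
--     for x in array[:n]:
--         s += x
--         prefix.append(s)
--     second_prefix = [0]
--     t = 0
--     for p in prefix:
--         t += p
--         second_prefix.append(t)
--     total = 0
--     stack = [n]  # candidate indices into prefix, strictly increasing prefix values, top first at the end
--     for i in reversed(range(n)):
--         while stack and prefix[i] <= prefix[stack[-1]]:
--             stack.pop()
--         j = stack[-1] if stack else n + 1
--         stack.append(i)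
--         total += second_prefix[j] - second_prefix[i + 1] - prefix[i] * (j - i - 1)
--     return total
-- ===== Notes on version B (the rewrite author's own statement) =====
-- stated objective: alternative
-- what changed: Replaces the jump-pointer nearest-smaller search with a monotonic stack, drops the nearest_smaller array entirely (each index's contribution is accumulated in the same backward pass), and builds both prefix-sum arrays with running sums over the elements instead of index loops over range().
import Mathlib
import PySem

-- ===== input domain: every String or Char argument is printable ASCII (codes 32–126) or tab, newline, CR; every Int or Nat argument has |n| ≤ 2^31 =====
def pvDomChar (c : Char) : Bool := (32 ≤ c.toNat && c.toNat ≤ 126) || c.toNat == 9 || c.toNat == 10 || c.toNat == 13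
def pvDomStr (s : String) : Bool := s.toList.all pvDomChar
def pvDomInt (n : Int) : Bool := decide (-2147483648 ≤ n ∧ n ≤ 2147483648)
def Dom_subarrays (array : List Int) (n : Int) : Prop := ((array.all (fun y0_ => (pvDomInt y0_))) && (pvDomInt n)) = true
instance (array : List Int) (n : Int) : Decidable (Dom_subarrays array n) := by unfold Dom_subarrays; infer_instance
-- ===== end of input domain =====

-- B replaces A's jump-pointer nearest-smaller search by a monotonic stack, drops the
-- nearest_smaller array, fuses the aggregation into the same backward pass, and builds
-- both prefix arrays by running sums over the elements instead of index loops.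

-- ===== PORT A =====
-- A's 'while j <= n and prefix[i] <= prefix[j]: j = nearest_smaller[j]'; the fuel
-- argument only totalises the loop (j strictly increases, so (n-i)+1 steps always suffice)
def subarraysA_while (pfx ns : List Int) (n i : Int) : Nat → Int → Int
  | 0, j => j
  | f+1, j =>
    if j ≤ n ∧ PySem.List.pyGetD pfx i 0 ≤ PySem.List.pyGetD pfx j 0 then
      subarraysA_while pfx ns n i f (PySem.List.pyGetD ns j 0)
    else j

def subarrays (array : List Int) (n : Int) : Int :=
  let pfx := (PySem.List.pyRange 0 n 1).foldl
      (fun p i => p ++ [PySem.List.pyGetD p (-1) 0 + PySem.List.pyGetD array i 0]) [0]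
  let spfx := (PySem.List.pyRange 0 (n+1) 1).foldl
      (fun p i => p ++ [PySem.List.pyGetD p (-1) 0 + PySem.List.pyGetD pfx i 0]) [0]
  let ns0 : List Int := List.replicate (n+1).toNat (n+1)
  let ns := (PySem.List.pyRange 0 n 1).reverse.foldl
      (fun ns i => PySem.List.pySetD ns i (subarraysA_while pfx ns n i ((n - i).toNat + 1) (i+1))) ns0
  (PySem.List.pyRange 0 n 1).foldl
      (fun acc i => acc + (PySem.List.pyGetD spfx (PySem.List.pyGetD ns i 0) 0
        - PySem.List.pyGetD spfx (i+1) 0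
        - PySem.List.pyGetD pfx i 0 * (PySem.List.pyGetD ns i 0 - i - 1))) 0

-- ===== PORT B =====
-- B's 'while stack and prefix[i] <= prefix[stack[-1]]: stack.pop()' (stack kept top-first)
def subarraysB_pop (pfx : List Int) (i : Int) : List Int → List Int
  | [] => []
  | j :: st =>
    if PySem.List.pyGetD pfx i 0 ≤ PySem.List.pyGetD pfx j 0 then subarraysB_pop pfx i st
    else j :: st

def subarrays_alt (array : List Int) (n : Int) : Int :=
  let pfx := ((PySem.List.slice array none (some n)).foldl
      (fun (sp : Int × List Int) x => (sp.1 + x, sp.2 ++ [sp.1 + x])) (0, [0])).2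
  let spfx := (pfx.foldl
      (fun (sp : Int × List Int) p => (sp.1 + p, sp.2 ++ [sp.1 + p])) (0, ([0] : List Int))).2
  ((PySem.List.pyRange 0 n 1).reverse.foldl
      (fun (ts : Int × List Int) i =>
        let st := subarraysB_pop pfx i ts.2
        let j := st.head?.getD (n+1)
        (ts.1 + (PySem.List.pyGetD spfx j 0 - PySem.List.pyGetD spfx (i+1) 0
          - PySem.List.pyGetD pfx i 0 * (j - i - 1)), i :: st))
      (0, [n])).1

-- ===== PRECONDITION & SPEC =====
-- Pre_ excludes exactly the inputs where Python A raises IndexError (array[i] with n > len(array)).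
def Pre_subarrays (array : List Int) (n : Int) : Prop := n ≤ (array.length : Int)
instance (array : List Int) (n : Int) : Decidable (Pre_subarrays array n) := by unfold Pre_subarrays; infer_instance
def pvWitness_subarrays : List Int × Int := ([3, -1, 2, -2, 1], 5)

def Spec_subarrays (array : List Int) (n : Int) (out : Int) : Prop := out = subarrays_alt array n
instance (array : List Int) (n : Int) (out : Int) : Decidable (Spec_subarrays array n out) := by unfold Spec_subarrays; infer_instance

-- ===== CLAIM (what is proved, stated in full; the proofs are below) =====
def Claim_equal_subarrays : Prop := ∀ (array : List Int) (n : Int), Dom_subarrays array n → Pre_subarrays array n → Spec_subarrays array n (subarrays array n)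

-- ===== LEMMAS AND PROOFS =====

-- the chain of jump pointers starting at j (the indices A's while loop can visit);
-- B's stack is exactly this chain for the next index to be processed + 1
def chainNS (n : Int) (ns : List Int) : Nat → Int → List Int
  | 0, _ => []
  | f+1, j => if j ≤ n then j :: chainNS n ns f (PySem.List.pyGetD ns j 0) else []

-- invariant of A's nearest_smaller array over indices ≥ k: each entry jumps strictly forward, at most to n+1
def GoodNS (n : Int) (ns : List Int) (k : Int) : Prop :=
  ns.length = (n+1).toNat ∧
  ∀ j : Int, k ≤ j → j ≤ n → j < PySem.List.pyGetD ns j 0 ∧ PySem.List.pyGetD ns j 0 ≤ n+1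

-- pyGetD/pySetD over Int indices that are in fact nonnegative
lemma pyGetD_pySetD_int (ns : List Int) (k j v : Int) (kn : 0 ≤ k) (jn : 0 ≤ j)
    (klen : k.toNat < ns.length) :
    PySem.List.pyGetD (PySem.List.pySetD ns k v) j 0
      = if j = k then v else PySem.List.pyGetD ns j 0 := by
  have hk := Int.toNat_of_nonneg kn
  have hj := Int.toNat_of_nonneg jn
  rw [← hk, ← hj, PySem.List.pyGetD_pySetD_natCast ns k.toNat j.toNat v 0 klen]
  by_cases h : j = k
  · rw [if_pos (by omega), if_pos (by omega)]
  · rw [if_neg (by omega), if_neg (by omega)]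

lemma chainNS_gt {n : Int} {ns : List Int} {j : Int} (h : n < j) (f : Nat) :
    chainNS n ns f j = [] := by
  cases f <;> simp [chainNS, not_le.mpr h]

lemma chainNS_fuel {n : Int} {ns : List Int} {k : Int} (hg : GoodNS n ns k) :
    ∀ (f₁ f₂ : Nat) (j : Int), k ≤ j → (n+1-j).toNat ≤ f₁ → (n+1-j).toNat ≤ f₂ →
      chainNS n ns f₁ j = chainNS n ns f₂ j := by
  intro f₁
  induction f₁ with
  | zero =>
    intro f₂ j hkj h1 h2
    by_cases hj : j ≤ n
    · exfalso; omega
    · rw [chainNS_gt (by omega), chainNS_gt (by omega)]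
  | succ a ih =>
    intro f₂ j hkj h1 h2
    by_cases hj : j ≤ n
    · obtain ⟨b, rfl⟩ : ∃ b, f₂ = b + 1 := ⟨f₂ - 1, by omega⟩
      obtain ⟨hlt, hle⟩ := hg.2 j hkj hj
      simp only [chainNS, if_pos hj]
      congr 1
      exact ih b _ (by omega) (by omega) (by omega)
    · rw [chainNS_gt (by omega), chainNS_gt (by omega)]

lemma chainNS_set_irrel {n : Int} {ns : List Int} {k : Int} {v : Int} (kn : 0 ≤ k)
    (klen : k.toNat < ns.length) (hg : GoodNS n ns (k+1)) :
    ∀ (f : Nat) (j : Int), k < j →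
      chainNS n (PySem.List.pySetD ns k v) f j = chainNS n ns f j := by
  intro f
  induction f with
  | zero => intro j _; rfl
  | succ a ih =>
    intro j hkj
    by_cases hj : j ≤ n
    · have hget : PySem.List.pyGetD (PySem.List.pySetD ns k v) j 0 = PySem.List.pyGetD ns j 0 := by
        rw [pyGetD_pySetD_int ns k j v kn (by omega) klen, if_neg (by omega)]
      have hnext : k < PySem.List.pyGetD ns j 0 := by
        have := (hg.2 j (by omega) hj).1; omega
      simp only [chainNS, if_pos hj, hget]
      congr 1
      exact ih _ hnext
    · rw [chainNS_gt (by omega), chainNS_gt (by omega)]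

lemma chainNS_head {n : Int} {ns : List Int} {r : Int} {f : Nat}
    (h1 : r ≤ n+1) (h2 : r ≤ n → 1 ≤ f) :
    (chainNS n ns f r).head?.getD (n+1) = r := by
  by_cases hr : r ≤ n
  · obtain ⟨a, rfl⟩ : ∃ a, f = a + 1 := ⟨f - 1, by have := h2 hr; omega⟩
    simp [chainNS, if_pos hr]
  · rw [chainNS_gt (by omega)]
    simp; omega

-- A's while loop and B's pop loop move in lockstep along the chain
lemma lockstep (pfx ns : List Int) (n i : Int) (hg : GoodNS n ns (i+1)) :
    ∀ (g : Nat) (j : Int), i < j → j ≤ n+1 → (n+1-j).toNat < g →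
      ∃ r, subarraysA_while pfx ns n i g j = r ∧ i < r ∧ r ≤ n+1 ∧ j ≤ r ∧
        ∀ f, (n+1-j).toNat ≤ f →
          subarraysB_pop pfx i (chainNS n ns f j) = chainNS n ns f r := by
  intro g
  induction g with
  | zero => intro j hij hjn1 hf; exact absurd hf (by omega)
  | succ g ih =>
    intro j hij hjn1 hf
    by_cases hj : j ≤ n
    · by_cases hcmp : PySem.List.pyGetD pfx i 0 ≤ PySem.List.pyGetD pfx j 0
      · obtain ⟨hlt, hle⟩ := hg.2 j (by omega) hj
        obtain ⟨r, heq, hir, hrn, hjr, hpop⟩ := ih (PySem.List.pyGetD ns j 0) (by omega) hle (by omega)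
        refine ⟨r, ?_, hir, hrn, by omega, ?_⟩
        · simp only [subarraysA_while, if_pos (And.intro hj hcmp)]; exact heq
        · intro f hf2
          obtain ⟨a, rfl⟩ : ∃ a, f = a + 1 := ⟨f - 1, by omega⟩
          simp only [chainNS, if_pos hj]
          simp only [subarraysB_pop, if_pos hcmp]
          rw [hpop a (by omega)]
          exact chainNS_fuel hg a (a + 1) r (by omega) (by omega) (by omega)
      · refine ⟨j, ?_, by omega, hjn1, le_refl j, ?_⟩
        · simp only [subarraysA_while]; rw [if_neg (by tauto)]
        · intro f hf2
          obtain ⟨a, rfl⟩ : ∃ a, f = a + 1 := ⟨f - 1, by omega⟩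
          simp only [chainNS, if_pos hj]
          simp only [subarraysB_pop]
          rw [if_neg hcmp]
    · refine ⟨j, ?_, by omega, hjn1, le_refl j, ?_⟩
      · simp only [subarraysA_while]; rw [if_neg (by tauto)]
      · intro f hf2
        rw [chainNS_gt (by omega)]
        simp [subarraysB_pop]

-- the main backward loop: A's fold building nearest_smaller vs B's fused stack-and-total fold
lemma mainloop (pfx spfx : List Int) (n : Int) :
    ∀ (k : Nat) (ns st : List Int) (tot : Int) (f : Nat),
      (k : Int) ≤ n → GoodNS n ns k → st = chainNS n ns f k → (n+1-(k:Int)).toNat ≤ f →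
      (∀ j : Int, (k:Int) ≤ j →
          PySem.List.pyGetD ((PySem.List.pyRange 0 (k:Int) 1).reverse.foldl
            (fun ns i => PySem.List.pySetD ns i (subarraysA_while pfx ns n i ((n - i).toNat + 1) (i+1))) ns) j 0
          = PySem.List.pyGetD ns j 0) ∧
      ((PySem.List.pyRange 0 (k:Int) 1).reverse.foldl
          (fun (ts : Int × List Int) i =>
            let st := subarraysB_pop pfx i ts.2
            let j := st.head?.getD (n+1)
            (ts.1 + (PySem.List.pyGetD spfx j 0 - PySem.List.pyGetD spfx (i+1) 0
              - PySem.List.pyGetD pfx i 0 * (j - i - 1)), i :: st))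
          (tot, st)).1
        = tot + ((PySem.List.pyRange 0 (k:Int) 1).map
            (fun i =>
              PySem.List.pyGetD spfx
                (PySem.List.pyGetD ((PySem.List.pyRange 0 (k:Int) 1).reverse.foldl
                  (fun ns i => PySem.List.pySetD ns i (subarraysA_while pfx ns n i ((n - i).toNat + 1) (i+1))) ns) i 0) 0
              - PySem.List.pyGetD spfx (i+1) 0
              - PySem.List.pyGetD pfx i 0 *
                (PySem.List.pyGetD ((PySem.List.pyRange 0 (k:Int) 1).reverse.foldl
                  (fun ns i => PySem.List.pySetD ns i (subarraysA_while pfx ns n i ((n - i).toNat + 1) (i+1))) ns) i 0 - i - 1))).sum := by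
  intro k
  induction k with
  | zero =>
    intro ns st tot f hk hg hst hf
    constructor
    · intro j hj
      rw [PySem.List.pyRange_one_eq_nil (by omega)]
      simp
    · rw [PySem.List.pyRange_one_eq_nil (by omega)]
      simp
  | succ k ih =>
    intro ns st tot f hk hg hst hf
    push_cast at hk hst hf ⊢
    have hk0 : (0:Int) ≤ (k:Int) := by positivity
    have hkn : (k:Int) ≤ n := by omega
    rw [PySem.List.pyRange_one_succ_right hk0]
    simp only [List.reverse_append, List.reverse_cons, List.reverse_nil, List.nil_append,
      List.cons_append, List.foldl_cons]
    -- the invariant GoodNS at (k+1)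
    have hgk1 : GoodNS n ns ((k:Int) + 1) := hg
    have hklen : ((k:Int)).toNat < ns.length := by
      have := hg.1; omega
    -- lockstep at index k
    obtain ⟨r, hreq, hir, hrn, hjr, hpop⟩ :=
      lockstep pfx ns n (k:Int) hgk1 ((n - (k:Int)).toNat + 1) ((k:Int) + 1)
        (by omega) (by omega) (by omega)
    rw [hreq]
    -- B's step
    have hpopst : subarraysB_pop pfx (k:Int) st = chainNS n ns f r := by
      rw [hst]; exact hpop f (by omega)
    have hhead : (chainNS n ns f r).head?.getD (n + 1) = r :=
      chainNS_head hrn (fun hrle => by omega)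
    -- the updated array
    set ns' := PySem.List.pySetD ns (k:Int) r with hns'
    have hget_self : PySem.List.pyGetD ns' (k:Int) 0 = r := by
      rw [hns', pyGetD_pySetD_int ns (k:Int) (k:Int) r hk0 hk0 hklen, if_pos rfl]
    have hget_other : ∀ j : Int, (k:Int) < j → PySem.List.pyGetD ns' j 0 = PySem.List.pyGetD ns j 0 := by
      intro j hj
      rw [hns', pyGetD_pySetD_int ns (k:Int) j r hk0 (by omega) hklen, if_neg (by omega)]
    have hg' : GoodNS n ns' (k:Int) := by
      refine ⟨by rw [hns', PySem.List.length_pySetD]; exact hg.1, ?_⟩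
      intro j hj hjn
      by_cases hjk : j = (k:Int)
      · subst hjk; rw [hget_self]; exact ⟨hir, hrn⟩
      · rw [hget_other j (by omega)]; exact hgk1.2 j (by omega) hjn
    have hst' : (k:Int) :: chainNS n ns f r = chainNS n ns' (f + 1) (k:Int) := by
      simp only [chainNS, if_pos hkn, hget_self]
      congr 1
      exact (chainNS_set_irrel hk0 hklen hgk1 f r hir).symm
    obtain ⟨hpres, htot⟩ := ih ns' ((k:Int) :: chainNS n ns f r)
      (tot + (PySem.List.pyGetD spfx r 0 - PySem.List.pyGetD spfx ((k:Int) + 1) 0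
        - PySem.List.pyGetD pfx (k:Int) 0 * (r - (k:Int) - 1))) (f + 1)
      hkn hg' hst' (by omega)
    constructor
    · intro j hj
      rw [hpres j (by omega), hget_other j (by omega)]
    · simp only [hpopst, hhead]
      rw [htot]
      simp only [List.map_append, List.sum_append, List.map_cons, List.map_nil, List.sum_cons,
        List.sum_nil]
      have hfinal_k : PySem.List.pyGetD ((PySem.List.pyRange 0 (k:Int) 1).reverse.foldl
          (fun ns i => PySem.List.pySetD ns i (subarraysA_while pfx ns n i ((n - i).toNat + 1) (i+1))) ns') (k:Int) 0 = r := by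
        rw [hpres (k:Int) (le_refl _), hget_self]
      rw [hfinal_k]
      ring

-- building a prefix list by appending 'last + x' equals carrying the running sum in a pair
lemma pairfold (L : List Int) :
    ∀ (acc : List Int) (s : Int) (h : acc ≠ []), acc.getLast h = s →
      L.foldl (fun p x => p ++ [PySem.List.pyGetD p (-1) 0 + x]) acc
        = (L.foldl (fun (sp : Int × List Int) x => (sp.1 + x, sp.2 ++ [sp.1 + x])) (s, acc)).2 := by
  induction L with
  | nil => intro acc s h hs; rfl
  | cons x L ih =>
    intro acc s h hs
    simp only [List.foldl_cons]
    rw [PySem.List.pyGetD_neg_one acc 0 h, hs]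
    exact ih (acc ++ [s + x]) (s + x) (by simp) (by simp)

lemma pairfold_len (L : List Int) :
    ∀ (sp : Int × List Int),
      ((L.foldl (fun (sp : Int × List Int) x => (sp.1 + x, sp.2 ++ [sp.1 + x])) sp).2).length
        = sp.2.length + L.length := by
  induction L with
  | nil => intro sp; simp
  | cons x L ih =>
    intro sp
    simp only [List.foldl_cons, List.length_cons]
    rw [ih]
    simp; omega

-- ===== VERDICT (by name: the statement is the Claim_ definition above) =====
theorem subarrays_spec : Claim_equal_subarrays := by
  intro array n _hdom hpre
  unfold Pre_subarrays at hpre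
  unfold Spec_subarrays
  simp only [subarrays, subarrays_alt]
  by_cases hn : n ≤ 0
  · simp [PySem.List.pyRange_one_eq_nil hn]
  · replace hn : 0 < n := by omega
    have hn0 : (0:Int) ≤ n := le_of_lt hn
    have hnN : ((n.toNat : Int)) = n := Int.toNat_of_nonneg hn0
    set L := array.take n.toNat with hL
    have hLlen : L.length = n.toNat := by rw [hL, List.length_take]; omega
    have eL : ((L.length : Int)) = n := by rw [hLlen]; exact hnN
    -- A's index-loop prefix build equals the element fold over L = array[:n]
    have hPA : (PySem.List.pyRange 0 n 1).foldl
          (fun p i => p ++ [PySem.List.pyGetD p (-1) 0 + PySem.List.pyGetD array i 0]) [0]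
        = L.foldl (fun p x => p ++ [PySem.List.pyGetD p (-1) 0 + x]) [0] := by
      rw [← eL]
      calc (PySem.List.pyRange 0 (L.length : Int) 1).foldl
            (fun p i => p ++ [PySem.List.pyGetD p (-1) 0 + PySem.List.pyGetD array i 0]) [0]
          = (PySem.List.pyRange 0 (L.length : Int) 1).foldl
            (fun p i => p ++ [PySem.List.pyGetD p (-1) 0 + PySem.List.pyGetD L i 0]) [0] := by
            refine PySem.List.foldl_congr_mem _ _ _ _ ?_
            intro acc x hx
            obtain ⟨hx0, hx1⟩ := PySem.List.mem_pyRange_one.mp hx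
            rw [PySem.List.pyGetD_eq_getElem L 0 hx0 hx1,
              PySem.List.pyGetD_eq_getElem array 0 hx0 (by rw [hLlen] at hx1; omega),
              List.getElem_take]
        _ = L.foldl (fun p x => p ++ [PySem.List.pyGetD p (-1) 0 + x]) [0] :=
            PySem.List.foldl_pyRange_zero_pyGetD' L 0
              (fun p x => p ++ [PySem.List.pyGetD p (-1) 0 + x]) [0]
    have hPB : L.foldl (fun p x => p ++ [PySem.List.pyGetD p (-1) 0 + x]) [0]
        = (L.foldl (fun (sp : Int × List Int) x => (sp.1 + x, sp.2 ++ [sp.1 + x])) (0, [0])).2 :=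
      pairfold L [0] 0 (by simp) (by simp)
    have hslice : PySem.List.slice array none (some n) = L := PySem.List.slice_to array hn0
    set P := (L.foldl (fun (sp : Int × List Int) x => (sp.1 + x, sp.2 ++ [sp.1 + x])) (0, [0])).2 with hP
    have hPlen : P.length = n.toNat + 1 := by rw [hP, pairfold_len]; simp [hLlen]; omega
    have ePlen : ((P.length : Int)) = n + 1 := by rw [hPlen]; push_cast; omega
    have hSA : (PySem.List.pyRange 0 (n+1) 1).foldl
          (fun p i => p ++ [PySem.List.pyGetD p (-1) 0 + PySem.List.pyGetD P i 0]) [0]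
        = P.foldl (fun p x => p ++ [PySem.List.pyGetD p (-1) 0 + x]) [0] := by
      rw [← ePlen]
      exact PySem.List.foldl_pyRange_zero_pyGetD' P 0
        (fun p x => p ++ [PySem.List.pyGetD p (-1) 0 + x]) [0]
    have hSB : P.foldl (fun p x => p ++ [PySem.List.pyGetD p (-1) 0 + x]) [0]
        = (P.foldl (fun (sp : Int × List Int) p => (sp.1 + p, sp.2 ++ [sp.1 + p])) (0, [0])).2 :=
      pairfold P [0] 0 (by simp) (by simp)
    set S := (P.foldl (fun (sp : Int × List Int) p => (sp.1 + p, sp.2 ++ [sp.1 + p])) (0, [0])).2 with hS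
    set ns0 : List Int := List.replicate (n+1).toNat (n+1) with hns0
    have hg0 : GoodNS n ns0 ((n.toNat : Int)) := by
      refine ⟨by simp [hns0], ?_⟩
      intro j hj hjn
      have hj0 : (0:Int) ≤ j := by omega
      have hget : PySem.List.pyGetD ns0 j 0 = n + 1 := by
        rw [PySem.List.pyGetD_eq_getElem ns0 0 hj0 (by simp [hns0]; omega)]
        simp [hns0]
      rw [hget]
      omega
    have hchain : ([n] : List Int) = chainNS n ns0 1 ((n.toNat : Int)) := by
      rw [hnN]
      simp [chainNS]
    obtain ⟨hpres, htot⟩ := mainloop P S n n.toNat ns0 [n] 0 1 (by omega) hg0 hchain (by omega)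
    rw [hnN] at htot
    rw [hPA, hPB, hSA, hSB, hslice]
    rw [PySem.List.foldl_add]
    rw [htot]
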